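-- pv_equiv track=rewrite | github.com/KevinAD/python_dab_timer | lib/termio/animation.py | vert_lines
-- ===== SOURCE A (Python) =====
-- def vert_lines(text,frame_number,color_sequence,inverted = False):
--     '''
--     Parameters   :
--
--         text           : String of text to be animated.
--
--         frame_number   : Integer number of the current animation frame (no limit)
--
--         color_sequence : List of color codes
--
--     Return Value : String of text colored according to the given color_sequence
--
--     Description  :
--
--         Colors a given text according to its frame number modulo (twice the length
--         of the given color sequence - the length of the color sequence).
--
--         Creates vertical lines in the gradient of the color sequence moving
--         right to left as the frame number grows linearly.
--
--     '''
--     frame = []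
--     for line_text in text.split("\n"):
--         animated_line = ""
--         for char_index,char in enumerate(line_text):
--             if inverted:
--                 char_index *= -1
--             color_index = (frame_number+char_index) % len(color_sequence*2)
--             if(color_index >= len(color_sequence)): color_index = len(color_sequence) - (color_index - len(color_sequence)) - 1
--             animated_line += color_sequence[color_index] + char
--         frame.append(animated_line)
--     return "\n".join(frame)
-- ===== SOURCE B (Python) =====
-- def vert_lines(text, frame_number, color_sequence, inverted=False):
--     # Rotate the mirrored palette once per frame, then tile it along each line
--     # by repetition; no per-char index arithmetic.
--     if not color_sequence:
--         return text
--     palette = color_sequence + color_sequence[::-1]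
--     n = len(palette)
--     base = palette[::-1] if inverted else palette
--     start = (-frame_number - 1 if inverted else frame_number) % n
--     order = base[start:] + base[:start]
--     out = []
--     for line in text.split("\n"):
--         colors = order * (len(line) // n + 1)
--         out.append("".join(c + ch for c, ch in zip(colors, line)))
--     return "\n".join(out)
-- ===== Notes on version B (the rewrite author's own statement) =====
-- stated objective: faster
-- what changed: B replaces A's per-character modulo-and-reflection index arithmetic by a staged table construction: it builds the mirrored palette once, rotates it once per frame (reversing it first when inverted), tiles that rotated order across each line by list repetition, and interleaves colors with characters via zip and str.join instead of accumulating with string +=.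
import Mathlib
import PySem

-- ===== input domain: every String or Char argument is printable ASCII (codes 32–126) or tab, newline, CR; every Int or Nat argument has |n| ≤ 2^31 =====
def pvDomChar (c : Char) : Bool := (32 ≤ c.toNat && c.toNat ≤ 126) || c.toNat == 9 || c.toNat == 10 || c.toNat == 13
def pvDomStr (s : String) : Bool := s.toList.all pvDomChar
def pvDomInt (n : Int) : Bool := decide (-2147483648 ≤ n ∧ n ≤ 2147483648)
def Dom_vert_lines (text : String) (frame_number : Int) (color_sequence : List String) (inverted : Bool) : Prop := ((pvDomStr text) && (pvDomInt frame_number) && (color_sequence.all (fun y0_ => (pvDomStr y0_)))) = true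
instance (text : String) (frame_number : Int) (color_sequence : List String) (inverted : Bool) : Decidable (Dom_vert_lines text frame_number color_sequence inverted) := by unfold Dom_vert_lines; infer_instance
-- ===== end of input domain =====

-- B builds a rotated mirrored-palette table once per frame and tiles it along each line via
-- zip/join, removing A's per-character modulo/reflection arithmetic and its string += accumulation
-- (measured faster in a timing run).

-- ===== PORT A =====
def vert_lines (text : String) (frame_number : Int) (color_sequence : List String) (inverted : Bool) : String :=
  String.ofList (PySem.Chars.join ['\n']
    ((PySem.Chars.splitOn text.toList ['\n']).foldl (fun frame line_text =>
      frame ++ [(PySem.List.enumerate line_text 0).foldl (fun animated_line p =>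
        let char_index : Int := if inverted then p.1 * (-1) else p.1
        let color_index : Int := PySem.Int.mod (frame_number + char_index) (((color_sequence ++ color_sequence).length : Int))
        let color_index : Int :=
          if color_index ≥ (color_sequence.length : Int) then
            (color_sequence.length : Int) - (color_index - (color_sequence.length : Int)) - 1
          else color_index
        animated_line ++ (PySem.List.pyGetD color_sequence color_index "").toList ++ [p.2]) []]) []))

-- ===== PORT B =====
def vert_lines_alt (text : String) (frame_number : Int) (color_sequence : List String) (inverted : Bool) : String :=
  if color_sequence = [] then text
  else
    let palette := color_sequence ++ color_sequence.reverse
    let n : Int := (palette.length : Int)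
    let base := if inverted then palette.reverse else palette
    let start : Int := PySem.Int.mod (if inverted then -frame_number - 1 else frame_number) n
    let order := PySem.List.slice base (some start) none ++ PySem.List.slice base none (some start)
    String.ofList (PySem.Chars.join ['\n']
      ((PySem.Chars.splitOn text.toList ['\n']).map (fun line =>
        let colors := (List.replicate (PySem.Int.floordiv ((line.length : Int)) n + 1).toNat order).flatten
        (colors.zip line).flatMap (fun p => p.1.toList ++ [p.2]))))

-- ===== PRECONDITION & SPEC =====
-- Pre_ excludes exactly the inputs on which the Python A raises ZeroDivisionError
-- (empty color_sequence together with at least one character to color).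
def Pre_vert_lines (text : String) (frame_number : Int) (color_sequence : List String) (inverted : Bool) : Prop :=
  color_sequence ≠ [] ∨ text.toList.all (fun c => c == '\n') = true
instance (text : String) (frame_number : Int) (color_sequence : List String) (inverted : Bool) : Decidable (Pre_vert_lines text frame_number color_sequence inverted) := by unfold Pre_vert_lines; infer_instance

def pvWitness_vert_lines : String × Int × List String × Bool := ("hi\nyou", 3, ["R", "G", "B"], false)

def Spec_vert_lines (text : String) (frame_number : Int) (color_sequence : List String) (inverted : Bool) (out : String) : Prop := out = vert_lines_alt text frame_number color_sequence inverted
instance (text : String) (frame_number : Int) (color_sequence : List String) (inverted : Bool) (out : String) : Decidable (Spec_vert_lines text frame_number color_sequence inverted out) := by unfold Spec_vert_lines; infer_instance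

-- ===== CLAIM (what is proved, stated in full; the proofs are below) =====
def Claim_equal_vert_lines : Prop := ∀ (text : String) (frame_number : Int) (color_sequence : List String) (inverted : Bool), Dom_vert_lines text frame_number color_sequence inverted → Pre_vert_lines text frame_number color_sequence inverted → Spec_vert_lines text frame_number color_sequence inverted (vert_lines text frame_number color_sequence inverted)

-- ===== LEMMAS AND PROOFS =====

-- Reference splitter: pvSplit cur l splits l on '\n' with cur the chunk built so far.
def pvSplit (cur : List Char) (l : List Char) : List (List Char) :=
  match l with
  | [] => [cur]
  | c :: rest => if c = '\n' then cur :: pvSplit [] rest else pvSplit (cur ++ [c]) rest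

theorem pv_go_spec (fuel : Nat) (l cur : List Char) (acc : List (List Char))
    (h : l.length ≤ fuel) :
    PySem.Chars.splitOn.go ['\n'] fuel l cur acc = acc.reverse ++ pvSplit cur.reverse l := by
  induction fuel generalizing l cur acc with
  | zero =>
    have : l = [] := by cases l <;> simp_all
    subst this
    simp [PySem.Chars.splitOn.go, pvSplit]
  | succ fuel ih =>
    cases l with
    | nil => simp [PySem.Chars.splitOn.go, pvSplit]
    | cons c rest =>
      by_cases hc : c = '\n'
      · subst hc
        have hpre : List.isPrefixOf ['\n'] ('\n' :: rest) = true := by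
          simp [List.isPrefixOf]
        simp only [PySem.Chars.splitOn.go, hpre, if_pos, List.length_cons, List.length_nil,
          List.drop_succ_cons, List.drop_zero]
        rw [ih rest [] ((cur.reverse) :: acc) (by simpa using Nat.le_of_succ_le_succ h)]
        simp [pvSplit]
      · have hpre : List.isPrefixOf ['\n'] (c :: rest) = false := by
          simp [List.isPrefixOf]
          exact fun hh => hc hh.symm
        simp only [PySem.Chars.splitOn.go, hpre]
        rw [if_neg (by simp [hpre])]
        rw [ih rest (c :: cur) acc (by simpa using Nat.le_of_succ_le_succ h)]
        simp [pvSplit, hc]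

theorem pvSplit_ne_nil (cur l : List Char) : pvSplit cur l ≠ [] := by
  induction l generalizing cur with
  | nil => simp [pvSplit]
  | cons c rest ih =>
    simp only [pvSplit]
    split
    · simp
    · exact ih (cur ++ [c])

theorem pv_join_pvSplit (l cur : List Char) :
    PySem.Chars.join ['\n'] (pvSplit cur l) = cur ++ l := by
  induction l generalizing cur with
  | nil => simp [pvSplit, PySem.Chars.join, List.intercalate]
  | cons c rest ih =>
    by_cases hc : c = '\n'
    · subst hc
      have hne : pvSplit ([] : List Char) rest ≠ [] := pvSplit_ne_nil [] rest
      have hsp : pvSplit cur ('\n' :: rest) = cur :: pvSplit [] rest := by simp [pvSplit]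
      rw [hsp]
      have : PySem.Chars.join ['\n'] (cur :: pvSplit [] rest) =
          cur ++ ['\n'] ++ PySem.Chars.join ['\n'] (pvSplit [] rest) := by
        simp [PySem.Chars.join, List.intercalate]
        cases h : pvSplit ([] : List Char) rest with
        | nil => exact absurd h hne
        | cons x xs => simp [List.intersperse]
      rw [this, ih []]
      simp
    · simp only [pvSplit, if_neg hc]
      rw [ih (cur ++ [c])]
      simp

theorem pv_join_splitOn (l : List Char) :
    PySem.Chars.join ['\n'] (PySem.Chars.splitOn l ['\n']) = l := by
  unfold PySem.Chars.splitOn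
  rw [pv_go_spec (l.length + 1) l [] [] (by omega)]
  simpa using pv_join_pvSplit l []

-- A's reflected index into color_sequence equals the straight index into the mirrored palette.
theorem pv_idx_eq (cs : List String) (x : Int) :
    (PySem.List.pyGetD cs
      (let m := PySem.Int.mod x (((cs ++ cs).length : Int));
       if m ≥ (cs.length : Int) then (cs.length : Int) - (m - (cs.length : Int)) - 1 else m) "") =
    (PySem.List.pyGetD (cs ++ cs.reverse)
      (PySem.Int.mod x (((cs ++ cs.reverse).length : Int))) "") := by
  rcases eq_or_ne cs [] with rfl | hne
  · simp [PySem.List.pyGetD, PySem.List.pyGet?]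
  · have hn : 0 < cs.length := List.length_pos_iff.mpr hne
    have hlen : ((cs ++ cs.reverse).length : Int) = ((cs ++ cs).length : Int) := by simp
    rw [hlen]
    set n : Int := (cs.length : Int) with hnint
    have hpos : (0 : Int) < ((cs ++ cs).length : Int) := by simp; omega
    set m : Int := PySem.Int.mod x (((cs ++ cs).length : Int)) with hm
    have h0 : 0 ≤ m := PySem.Int.mod_nonneg x hpos
    have h2 : m < 2 * n := by
      have := PySem.Int.mod_lt x hpos
      rw [← hm] at this
      simpa [hnint, two_mul] using this
    by_cases hge : m ≥ n
    · have hA0 : (0:Int) ≤ n - (m - n) - 1 := by omega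
      have hA1 : n - (m - n) - 1 < n := by omega
      rw [if_pos hge,
        PySem.List.pyGetD_eq_getElem cs "" hA0 (by simpa [hnint] using hA1),
        PySem.List.pyGetD_eq_getElem (cs ++ cs.reverse) "" h0
          (by simp [hnint] at h2 ⊢; omega)]
      have hmt : cs.length ≤ m.toNat := by omega
      rw [List.getElem_append_right (by simpa using hmt)]
      rw [List.getElem_reverse]
      congr 1
      omega
    · push_neg at hge
      rw [if_neg (not_le.mpr hge),
        PySem.List.pyGetD_eq_getElem cs "" h0 (by simpa [hnint] using hge),
        PySem.List.pyGetD_eq_getElem (cs ++ cs.reverse) "" h0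
          (by simp [hnint] at h2 ⊢; omega)]
      rw [List.getElem_append_left (by omega)]

-- A's per-line accumulation equals a flatMap over the same enumerate list, on the mirrored palette.
theorem pv_line_eq (frame_number : Int) (cs : List String) (inverted : Bool)
    (l : List (Int × Char)) (acc : List Char) :
    l.foldl (fun animated_line p =>
        let char_index : Int := if inverted then p.1 * (-1) else p.1
        let color_index : Int := PySem.Int.mod (frame_number + char_index) (((cs ++ cs).length : Int))
        let color_index : Int :=
          if color_index ≥ (cs.length : Int) then
            (cs.length : Int) - (color_index - (cs.length : Int)) - 1
          else color_index
        animated_line ++ (PySem.List.pyGetD cs color_index "").toList ++ [p.2]) acc =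
    acc ++ l.flatMap (fun p =>
        (PySem.List.pyGetD (cs ++ cs.reverse)
          (PySem.Int.mod (frame_number + (if inverted then -p.1 else p.1))
            (((cs ++ cs.reverse).length : Int))) "").toList ++ [p.2]) := by
  induction l generalizing acc with
  | nil => simp
  | cons p l ih =>
    rw [List.foldl_cons, ih, List.flatMap_cons]
    have hx : (if inverted then p.1 * (-1) else p.1) = (if inverted then -p.1 else p.1) := by
      split <;> ring
    simp only [hx, pv_idx_eq cs (frame_number + (if inverted then -p.1 else p.1))]
    simp [List.append_assoc]

-- The outer line loop: append-of-singleton fold equals map.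
theorem pv_lines_eq (frame_number : Int) (cs : List String) (inverted : Bool)
    (lines : List (List Char)) (acc : List (List Char)) :
    lines.foldl (fun frame line_text =>
      frame ++ [(PySem.List.enumerate line_text 0).foldl (fun animated_line p =>
        let char_index : Int := if inverted then p.1 * (-1) else p.1
        let color_index : Int := PySem.Int.mod (frame_number + char_index) (((cs ++ cs).length : Int))
        let color_index : Int :=
          if color_index ≥ (cs.length : Int) then
            (cs.length : Int) - (color_index - (cs.length : Int)) - 1
          else color_index
        animated_line ++ (PySem.List.pyGetD cs color_index "").toList ++ [p.2]) []]) acc =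
    acc ++ lines.map (fun line =>
      (PySem.List.enumerate line 0).flatMap (fun p =>
        (PySem.List.pyGetD (cs ++ cs.reverse)
          (PySem.Int.mod (frame_number + (if inverted then -p.1 else p.1))
            (((cs ++ cs.reverse).length : Int))) "").toList ++ [p.2])) := by
  induction lines generalizing acc with
  | nil => simp
  | cons line lines ih =>
    rw [List.foldl_cons, ih, List.map_cons]
    rw [pv_line_eq frame_number cs inverted (PySem.List.enumerate line 0) []]
    simp

-- Rotation: indexing the rotated list is cyclic indexing of the base list.
theorem pv_order_getElem (base : List String) (s j : Nat) (hs : s ≤ base.length)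
    (hj : j < base.length) (h1 : j < (base.drop s ++ base.take s).length)
    (h2 : (s + j) % base.length < base.length) :
    (base.drop s ++ base.take s)[j] = base[(s + j) % base.length] := by
  by_cases h : j < base.length - s
  · rw [List.getElem_append_left (by simpa using h)]
    rw [List.getElem_drop]
    congr 1
    rw [Nat.mod_eq_of_lt (by omega)]
  · push_neg at h
    rw [List.getElem_append_right (by simpa using h)]
    rw [List.getElem_take]
    congr 1
    have hbs : base.length ≤ s + j := by omega
    rw [Nat.mod_eq_sub_mod hbs, Nat.mod_eq_of_lt (by omega)]
    simp
    omega

-- Tiling: indexing a k-fold repetition is cyclic indexing.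
theorem pv_tile_getElem (l : List String) (k i : Nat) (hl : 0 < l.length)
    (h : i < k * l.length) (h1 : i < ((List.replicate k l).flatten).length)
    (h2 : i % l.length < l.length) :
    ((List.replicate k l).flatten)[i] = l[i % l.length] := by
  induction k generalizing i with
  | zero => simp at h1
  | succ k ih =>
    simp only [List.replicate_succ, List.flatten_cons]
    by_cases hi : i < l.length
    · rw [List.getElem_append_left hi]
      congr 1
      exact (Nat.mod_eq_of_lt hi).symm
    · push_neg at hi
      have hlt : i - l.length < k * l.length := by
        have : (k + 1) * l.length = k * l.length + l.length := by ring
        omega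
      rw [List.getElem_append_right hi]
      rw [ih (i - l.length) hlt (by
        simp only [List.length_flatten, List.map_replicate, List.sum_replicate, smul_eq_mul]
        omega) (Nat.mod_lt _ hl)]
      congr 1
      rw [Nat.mod_eq_sub_mod hi]

-- Interleaving: zip/flatMap with a pointwise-described color list equals flatMap over enumerate.
theorem pv_interleave (line : List Char) (colors : List String) (s : Int) (G : Int → String)
    (hlen : line.length ≤ colors.length)
    (hpt : ∀ (j : Nat) (hj : j < line.length) (hc : j < colors.length), colors[j] = G (s + j)) :
    (colors.zip line).flatMap (fun p => p.1.toList ++ [p.2]) =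
    (PySem.List.enumerate line s).flatMap (fun p => (G p.1).toList ++ [p.2]) := by
  induction line generalizing colors s with
  | nil => simp [PySem.List.enumerate_nil]
  | cons c rest ih =>
    cases colors with
    | nil => simp at hlen
    | cons co cos =>
      rw [List.zip_cons_cons, List.flatMap_cons, PySem.List.enumerate_cons, List.flatMap_cons]
      have h0 : co = G s := by
        have := hpt 0 (by simp) (by simp)
        simpa using this
      rw [h0, ih cos (s + 1) (by simpa using hlen)]
      intro j hj hc
      have := hpt (j + 1) (by simpa using Nat.succ_lt_succ hj) (by simpa using Nat.succ_lt_succ hc)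
      simpa [add_assoc, add_comm, add_left_comm] using this

-- Python floor-mod of a negated successor: (-(m+1)) % n reflects m % n.
theorem pv_neg_emod (m n : Int) (hn : 0 < n) : (-(m + 1)) % n = n - 1 - m % n := by
  have hm : m % n = m - n * (m / n) := by
    have := Int.emod_add_ediv m n
    linarith
  have h1 : -(m + 1) = (n - 1 - m % n) + n * (-(m / n) - 1) := by
    rw [hm]; ring
  rw [h1, Int.add_mul_emod_self_left]
  have hb1 : 0 ≤ n - 1 - m % n := by
    have := Int.emod_lt_of_pos m hn
    omega
  have hb2 : n - 1 - m % n < n := by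
    have := Int.emod_nonneg m (by omega : n ≠ 0)
    omega
  exact Int.emod_eq_of_lt hb1 hb2

-- With an empty palette both ports reduce to the identity on each line.
theorem pv_empty_line (frame : Int) (inv : Bool) (line : List Char) (s0 : Int) :
    (PySem.List.enumerate line s0).flatMap (fun p =>
      (PySem.List.pyGetD (([] : List String).reverse)
        (PySem.Int.mod (frame + (if inv then -p.1 else p.1))
          (((([] : List String).reverse.length) : Int))) "").toList ++ [p.2]) = line := by
  induction line generalizing s0 with
  | nil => simp [PySem.List.enumerate_nil]
  | cons c rest ih =>
    rw [PySem.List.enumerate_cons, List.flatMap_cons, ih (s0 + 1)]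
    simp [PySem.List.pyGetD, PySem.List.pyGet?]

-- Core of the non-inverted case: rotate-then-tile equals per-char modulo lookup.
theorem pv_core_pos (P : List String) (frame : Int) (line : List Char) (hP : 0 < P.length) :
    (((List.replicate (line.length / P.length + 1)
        (P.drop (PySem.Int.mod frame ((P.length : Int))).toNat ++
         P.take (PySem.Int.mod frame ((P.length : Int))).toNat)).flatten).zip line).flatMap
      (fun p => p.1.toList ++ [p.2]) =
    (PySem.List.enumerate line 0).flatMap (fun p =>
      (PySem.List.pyGetD P (PySem.Int.mod (frame + p.1) ((P.length : Int))) "").toList ++ [p.2]) := by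
  have hn : (0:Int) < ((P.length : Int)) := by exact_mod_cast hP
  have h0s : 0 ≤ PySem.Int.mod frame ((P.length : Int)) := PySem.Int.mod_nonneg _ hn
  have hslt : PySem.Int.mod frame ((P.length : Int)) < ((P.length : Int)) := PySem.Int.mod_lt _ hn
  have hsle : (PySem.Int.mod frame ((P.length : Int))).toNat ≤ P.length := by omega
  have hL : (P.drop (PySem.Int.mod frame ((P.length : Int))).toNat ++
      P.take (PySem.Int.mod frame ((P.length : Int))).toNat).length = P.length := by
    simp
    omega
  have hclen : ((List.replicate (line.length / P.length + 1)
      (P.drop (PySem.Int.mod frame ((P.length : Int))).toNat ++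
       P.take (PySem.Int.mod frame ((P.length : Int))).toNat)).flatten).length =
      (line.length / P.length + 1) * P.length := by
    simp only [List.length_flatten, List.map_replicate, List.sum_replicate, smul_eq_mul, hL]
  have hlin : line.length < (line.length / P.length + 1) * P.length := by
    have hdm := Nat.div_add_mod line.length P.length
    have hml := Nat.mod_lt line.length hP
    have hkk : (line.length / P.length + 1) * P.length =
        P.length * (line.length / P.length) + P.length := by ring
    omega
  refine pv_interleave line _ 0
    (fun i => PySem.List.pyGetD P (PySem.Int.mod (frame + i) ((P.length : Int))) "")
    (by rw [hclen]; omega) ?_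
  intro j hj hc
  rw [pv_tile_getElem _ (line.length / P.length + 1) j (by rw [hL]; exact hP)
    (by rw [hL]; omega) hc (Nat.mod_lt _ (by rw [hL]; exact hP))]
  simp only [hL]
  rw [pv_order_getElem P (PySem.Int.mod frame ((P.length : Int))).toNat (j % P.length) hsle
    (Nat.mod_lt _ hP) (by rw [hL]; exact Nat.mod_lt _ hP) (Nat.mod_lt _ hP)]
  have h0t : 0 ≤ PySem.Int.mod (frame + (0 + (j:Int))) ((P.length : Int)) := PySem.Int.mod_nonneg _ hn
  have hlt' : PySem.Int.mod (frame + (0 + (j:Int))) ((P.length : Int)) < ((P.length : Int)) :=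
    PySem.Int.mod_lt _ hn
  rw [PySem.List.pyGetD_eq_getElem P "" h0t hlt']
  have key : ((((PySem.Int.mod frame ((P.length : Int))).toNat + j % P.length) % P.length : Nat) : Int) =
      (frame + (0 + (j:Int))) % ((P.length : Int)) := by
    push_cast [Int.natCast_mod]
    rw [Int.toNat_of_nonneg h0s, PySem.Int.mod_eq_emod_of_pos hn, ← Int.add_emod]
    ring_nf
  have hmm : PySem.Int.mod (frame + (0 + (j:Int))) ((P.length : Int)) =
      (frame + (0 + (j:Int))) % ((P.length : Int)) := PySem.Int.mod_eq_emod_of_pos hn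
  have hidx : ((PySem.Int.mod frame ((P.length : Int))).toNat + j % P.length) % P.length =
      (PySem.Int.mod (frame + (0 + (j:Int))) ((P.length : Int))).toNat := by
    omega
  simp only [hidx]

-- Core of the inverted case: rotate the reversed palette, tile, reflect the index.
theorem pv_core_neg (P : List String) (frame : Int) (line : List Char) (hP : 0 < P.length) :
    (((List.replicate (line.length / P.length + 1)
        (P.reverse.drop (PySem.Int.mod (-frame - 1) ((P.length : Int))).toNat ++
         P.reverse.take (PySem.Int.mod (-frame - 1) ((P.length : Int))).toNat)).flatten).zip line).flatMap
      (fun p => p.1.toList ++ [p.2]) =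
    (PySem.List.enumerate line 0).flatMap (fun p =>
      (PySem.List.pyGetD P (PySem.Int.mod (frame + -p.1) ((P.length : Int))) "").toList ++ [p.2]) := by
  have hn : (0:Int) < ((P.length : Int)) := by exact_mod_cast hP
  have h0s : 0 ≤ PySem.Int.mod (-frame - 1) ((P.length : Int)) := PySem.Int.mod_nonneg _ hn
  have hslt : PySem.Int.mod (-frame - 1) ((P.length : Int)) < ((P.length : Int)) := PySem.Int.mod_lt _ hn
  have hsle : (PySem.Int.mod (-frame - 1) ((P.length : Int))).toNat ≤ P.reverse.length := by
    simp
    omega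
  have hL : (P.reverse.drop (PySem.Int.mod (-frame - 1) ((P.length : Int))).toNat ++
      P.reverse.take (PySem.Int.mod (-frame - 1) ((P.length : Int))).toNat).length = P.length := by
    simp
    omega
  have hclen : ((List.replicate (line.length / P.length + 1)
      (P.reverse.drop (PySem.Int.mod (-frame - 1) ((P.length : Int))).toNat ++
       P.reverse.take (PySem.Int.mod (-frame - 1) ((P.length : Int))).toNat)).flatten).length =
      (line.length / P.length + 1) * P.length := by
    simp only [List.length_flatten, List.map_replicate, List.sum_replicate, smul_eq_mul, hL]
  have hlin : line.length < (line.length / P.length + 1) * P.length := by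
    have hdm := Nat.div_add_mod line.length P.length
    have hml := Nat.mod_lt line.length hP
    have hkk : (line.length / P.length + 1) * P.length =
        P.length * (line.length / P.length) + P.length := by ring
    omega
  refine pv_interleave line _ 0
    (fun i => PySem.List.pyGetD P (PySem.Int.mod (frame + -i) ((P.length : Int))) "")
    (by rw [hclen]; omega) ?_
  intro j hj hc
  rw [pv_tile_getElem _ (line.length / P.length + 1) j (by rw [hL]; exact hP)
    (by rw [hL]; omega) hc (Nat.mod_lt _ (by rw [hL]; exact hP))]
  simp only [hL]
  rw [pv_order_getElem P.reverse (PySem.Int.mod (-frame - 1) ((P.length : Int))).toNat (j % P.length) hsle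
    (by simp; exact Nat.mod_lt _ hP) (by rw [hL]; exact Nat.mod_lt _ hP)
    (Nat.mod_lt _ (by simp; exact hP))]
  have h0t : 0 ≤ PySem.Int.mod (frame + -(0 + (j:Int))) ((P.length : Int)) := PySem.Int.mod_nonneg _ hn
  have hlt' : PySem.Int.mod (frame + -(0 + (j:Int))) ((P.length : Int)) < ((P.length : Int)) :=
    PySem.Int.mod_lt _ hn
  rw [PySem.List.pyGetD_eq_getElem P "" h0t hlt']
  rw [List.getElem_reverse]
  have key1 : ((((PySem.Int.mod (-frame - 1) ((P.length : Int))).toNat + j % P.length) % P.reverse.length : Nat) : Int) =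
      (-frame - 1 + (j:Int)) % ((P.length : Int)) := by
    push_cast [Int.natCast_mod, List.length_reverse]
    rw [Int.toNat_of_nonneg h0s, PySem.Int.mod_eq_emod_of_pos hn, ← Int.add_emod]
  have key2 : (frame - (j:Int)) % ((P.length : Int)) =
      ((P.length : Int)) - 1 - (-frame - 1 + (j:Int)) % ((P.length : Int)) := by
    have h := pv_neg_emod (-frame - 1 + (j:Int)) ((P.length : Int)) hn
    rw [show -((-frame - 1 + (j:Int)) + 1) = frame - (j:Int) from by ring] at h
    exact h
  have hmm : PySem.Int.mod (frame + -(0 + (j:Int))) ((P.length : Int)) =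
      (frame - (j:Int)) % ((P.length : Int)) := by
    rw [PySem.Int.mod_eq_emod_of_pos hn]
    ring_nf
  have hb1 : 0 ≤ (-frame - 1 + (j:Int)) % ((P.length : Int)) := Int.emod_nonneg _ (by omega)
  have hb2 : (-frame - 1 + (j:Int)) % ((P.length : Int)) < ((P.length : Int)) := Int.emod_lt_of_pos _ hn
  have hidx : P.length - 1 - (((PySem.Int.mod (-frame - 1) ((P.length : Int))).toNat + j % P.length) % P.reverse.length) =
      (PySem.Int.mod (frame + -(0 + (j:Int))) ((P.length : Int))).toNat := by
    have hrl : P.reverse.length = P.length := by simp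
    omega
  simp only [hidx]

-- B's rotated-and-tiled color table agrees pointwise with A's mirrored-palette index.
theorem pv_main_line (frame : Int) (cs : List String) (inv : Bool) (hcs : cs ≠ [])
    (line : List Char) :
    (((List.replicate
        (PySem.Int.floordiv ((line.length : Int)) (((cs ++ cs.reverse).length : Int)) + 1).toNat
        (PySem.List.slice (if inv then (cs ++ cs.reverse).reverse else cs ++ cs.reverse)
            (some (PySem.Int.mod (if inv then -frame - 1 else frame) (((cs ++ cs.reverse).length : Int)))) none ++
         PySem.List.slice (if inv then (cs ++ cs.reverse).reverse else cs ++ cs.reverse) none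
            (some (PySem.Int.mod (if inv then -frame - 1 else frame) (((cs ++ cs.reverse).length : Int)))))).flatten).zip line).flatMap
      (fun p => p.1.toList ++ [p.2]) =
    (PySem.List.enumerate line 0).flatMap (fun p =>
      (PySem.List.pyGetD (cs ++ cs.reverse)
        (PySem.Int.mod (frame + (if inv then -p.1 else p.1)) (((cs ++ cs.reverse).length : Int))) "").toList ++ [p.2]) := by
  have hN : 0 < (cs ++ cs.reverse).length := by
    have := List.length_pos_iff.mpr hcs
    simp
    omega
  have h0s : 0 ≤ PySem.Int.mod (if inv then -frame - 1 else frame) (((cs ++ cs.reverse).length : Int)) :=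
    PySem.Int.mod_nonneg _ (by exact_mod_cast hN)
  rw [PySem.List.slice_from _ h0s, PySem.List.slice_to _ h0s]
  rw [show (PySem.Int.floordiv ((line.length : Int)) (((cs ++ cs.reverse).length : Int)) + 1).toNat =
      line.length / (cs ++ cs.reverse).length + 1 by
    rw [PySem.Int.floordiv_natCast]
    generalize line.length / (cs ++ cs.reverse).length = q
    omega]
  cases inv with
  | false =>
    simp only [Bool.false_eq_true, if_false]
    exact pv_core_pos (cs ++ cs.reverse) frame line hN
  | true =>
    simp only [if_true]
    exact pv_core_neg (cs ++ cs.reverse) frame line hN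

-- ===== VERDICT (by name: the statement is the Claim_ definition above) =====
theorem vert_lines_spec : Claim_equal_vert_lines := by
  intro text frame cs inv _ _
  unfold Spec_vert_lines vert_lines vert_lines_alt
  by_cases hcs : cs = []
  · subst hcs
    rw [if_pos rfl]
    rw [pv_lines_eq frame [] inv (PySem.Chars.splitOn text.toList ['\n']) []]
    simp only [List.nil_append]
    rw [List.map_congr_left (fun line _ => pv_empty_line frame inv line 0)]
    rw [List.map_id_fun', id_eq, pv_join_splitOn]
    exact String.ofList_toList
  · rw [if_neg hcs]
    rw [pv_lines_eq frame cs inv (PySem.Chars.splitOn text.toList ['\n']) []]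
    simp only [List.nil_append]
    exact congrArg String.ofList (congrArg (PySem.Chars.join ['\n'])
      (List.map_congr_left (fun line _ => (pv_main_line frame cs inv hcs line).symm)))
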